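-- pv_equiv track=rewrite | github.com/nmenezes1994/adventofcode2025 | day5/part1/main.py | get_fresh_available_ids
-- ===== SOURCE A (Python) =====
-- def get_fresh_available_ids(fresh_id_ranges: list[tuple[int, int]], available_ids: list[int]) -> list[int]:
--     fresh_available_ids: list[int] = []
--
--     for available_id in available_ids:
--         for fresh_id_range in fresh_id_ranges:
--             if fresh_id_range[0] <= available_id <= fresh_id_range[1]:
--                 fresh_available_ids.append(available_id)
--                 break
--
--     return fresh_available_ids
-- ===== SOURCE B (Python) =====
-- def get_fresh_available_ids(fresh_id_ranges, available_ids):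
--     # Sort ranges by start once and merge overlapping ones into a disjoint,
--     # start-increasing list, then answer each id by binary search.
--     merged = []
--     for lo, hi in sorted(fresh_id_ranges, key=lambda r: r[0]):
--         if lo > hi:
--             continue
--         if merged and lo <= merged[-1][1]:
--             if hi > merged[-1][1]:
--                 merged[-1] = (merged[-1][0], hi)
--         else:
--             merged.append((lo, hi))
--     out = []
--     for x in available_ids:
--         lo, hi = 0, len(merged)
--         while lo < hi:
--             mid = (lo + hi) // 2
--             if merged[mid][0] <= x:
--                 lo = mid + 1
--             else:
--                 hi = mid
--         if lo > 0 and x <= merged[lo - 1][1]: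
--             out.append(x)
--     return out
-- ===== Notes on version B (the rewrite author's own statement) =====
-- stated objective: faster
-- what changed: B sorts the ranges once, merges them into disjoint start-increasing intervals, and answers each id with a binary search over the merged intervals, instead of A's linear scan of all ranges per id.
import Mathlib
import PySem

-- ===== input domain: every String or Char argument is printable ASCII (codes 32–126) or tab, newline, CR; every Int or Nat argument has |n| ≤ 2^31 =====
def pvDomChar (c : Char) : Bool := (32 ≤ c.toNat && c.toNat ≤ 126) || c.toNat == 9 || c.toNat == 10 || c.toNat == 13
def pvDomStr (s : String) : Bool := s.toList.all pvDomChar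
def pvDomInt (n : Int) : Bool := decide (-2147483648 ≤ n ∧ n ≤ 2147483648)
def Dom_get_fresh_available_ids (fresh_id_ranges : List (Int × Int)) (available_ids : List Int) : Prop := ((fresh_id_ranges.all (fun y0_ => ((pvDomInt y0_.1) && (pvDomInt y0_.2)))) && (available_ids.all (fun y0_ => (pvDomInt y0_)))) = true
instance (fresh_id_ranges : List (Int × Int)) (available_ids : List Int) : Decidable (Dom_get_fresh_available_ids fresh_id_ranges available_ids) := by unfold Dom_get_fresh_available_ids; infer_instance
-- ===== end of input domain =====

-- B replaces A's per-id linear scan of all ranges by a sort-merge of the ranges and a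
-- binary search per id (measurably faster on large inputs); same return value everywhere.

-- ===== PORT A =====
-- inner `for fresh_id_range in fresh_id_ranges: … break` loop of A
def pvInnerA (ranges : List (Int × Int)) (x : Int) (acc : List Int) : List Int :=
  match ranges with
  | [] => acc
  | r :: rest => if r.1 ≤ x ∧ x ≤ r.2 then acc ++ [x] else pvInnerA rest x acc

def get_fresh_available_ids (fresh_id_ranges : List (Int × Int)) (available_ids : List Int) : List Int :=
  available_ids.foldl (fun acc x => pvInnerA fresh_id_ranges x acc) []

-- ===== PORT B =====
-- one iteration of B's merge loop (`merged[-1]` = getLast, mutation = dropLast ++ [·])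
def pvMergeStep (merged : List (Int × Int)) (r : Int × Int) : List (Int × Int) :=
  if r.1 > r.2 then merged
  else
    match merged.getLast? with
    | some p =>
        if r.1 ≤ p.2 then
          (if r.2 > p.2 then merged.dropLast ++ [(p.1, r.2)] else merged)
        else merged ++ [r]
    | none => merged ++ [r]

-- B's `while lo < hi` binary-search loop
def pvBsearch (merged : List (Int × Int)) (x : Int) (lo hi : Nat) : Nat :=
  if h : lo < hi then
    let mid := (lo + hi) / 2
    if (merged.getD mid (0, 0)).1 ≤ x then pvBsearch merged x (mid + 1) hi
    else pvBsearch merged x lo mid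
  else lo
termination_by hi - lo
decreasing_by all_goals omega

def get_fresh_available_ids_alt (fresh_id_ranges : List (Int × Int)) (available_ids : List Int) : List Int :=
  let merged := (PySem.List.sorted fresh_id_ranges (fun r => r.1)).foldl pvMergeStep []
  available_ids.foldl (fun out x =>
    let lo := pvBsearch merged x 0 merged.length
    if 0 < lo then
      (if x ≤ (merged.getD (lo - 1) (0, 0)).2 then out ++ [x] else out)
    else out) []

-- ===== PRECONDITION & SPEC =====
def Spec_get_fresh_available_ids (fresh_id_ranges : List (Int × Int)) (available_ids : List Int) (out : List Int) : Prop := out = get_fresh_available_ids_alt fresh_id_ranges available_ids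
instance (fresh_id_ranges : List (Int × Int)) (available_ids : List Int) (out : List Int) : Decidable (Spec_get_fresh_available_ids fresh_id_ranges available_ids out) := by unfold Spec_get_fresh_available_ids; infer_instance

-- ===== CLAIM (what is proved, stated in full; the proofs are below) =====
def Claim_equal_get_fresh_available_ids : Prop := ∀ (fresh_id_ranges : List (Int × Int)) (available_ids : List Int), Dom_get_fresh_available_ids fresh_id_ranges available_ids → Spec_get_fresh_available_ids fresh_id_ranges available_ids (get_fresh_available_ids fresh_id_ranges available_ids)

-- ===== LEMMAS AND PROOFS =====

-- `x` is covered by some range of `l`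
def pvCovered (l : List (Int × Int)) (x : Int) : Prop := ∃ r ∈ l, r.1 ≤ x ∧ x ≤ r.2

-- the merge-loop state: nonempty, disjoint, start-increasing intervals
def pvChain (l : List (Int × Int)) : Prop :=
  (∀ q ∈ l, q.1 ≤ q.2) ∧ l.Pairwise (fun a b => a.2 < b.1)

theorem pvInnerA_pos (rs : List (Int × Int)) (x : Int) (acc : List Int)
    (h : pvCovered rs x) : pvInnerA rs x acc = acc ++ [x] := by
  induction rs with
  | nil => exact absurd h (by simp [pvCovered])
  | cons r rest ih =>
      simp only [pvInnerA]
      by_cases hr : r.1 ≤ x ∧ x ≤ r.2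
      · rw [if_pos hr]
      · rw [if_neg hr]
        refine ih ?_
        obtain ⟨q, hq, hx⟩ := h
        rcases List.mem_cons.1 hq with rfl | hq
        · exact absurd hx hr
        · exact ⟨q, hq, hx⟩

theorem pvInnerA_neg (rs : List (Int × Int)) (x : Int) (acc : List Int)
    (h : ¬ pvCovered rs x) : pvInnerA rs x acc = acc := by
  induction rs with
  | nil => rfl
  | cons r rest ih =>
      simp only [pvInnerA]
      rw [if_neg (fun hr => h ⟨r, by simp, hr⟩)]
      exact ih (fun ⟨q, hq, hx⟩ => h ⟨q, .tail _ hq, hx⟩)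

theorem pvMergeStep_spec (acc : List (Int × Int)) (r : Int × Int)
    (hc : pvChain acc) (hle : ∀ q ∈ acc, q.1 ≤ r.1) :
    pvChain (pvMergeStep acc r) ∧
    (∀ x, pvCovered (pvMergeStep acc r) x ↔ (pvCovered acc x ∨ (r.1 ≤ x ∧ x ≤ r.2))) ∧
    (∀ q ∈ pvMergeStep acc r, q.1 ∈ acc.map Prod.fst ∨ q.1 = r.1) := by
  by_cases hrv : r.1 > r.2
  · have hms : pvMergeStep acc r = acc := by simp [pvMergeStep, hrv]
    rw [hms]
    refine ⟨hc, fun x => ⟨Or.inl, ?_⟩, fun q hq => Or.inl (List.mem_map.2 ⟨q, hq, rfl⟩)⟩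
    rintro (h | ⟨h1, h2⟩); · exact h
    · omega
  · match hlast : acc.getLast? with
    | none =>
        have hacc : acc = [] := List.getLast?_eq_none_iff.1 hlast
        subst hacc
        have hms : pvMergeStep [] r = [r] := by simp [pvMergeStep, hrv]
        rw [hms]
        refine ⟨⟨by simp; omega, by simp⟩, fun x => ?_, by simp⟩
        simp [pvCovered]
    | some p =>
        have hmem : p ∈ acc := List.mem_of_getLast? hlast
        obtain ⟨init, hinit⟩ : ∃ init, acc = init ++ [p] := by
          refine ⟨acc.dropLast, ?_⟩
          have := List.dropLast_append_getLast? (l := acc) (a := p) hlast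
          simpa using this.symm
        have hple : p.1 ≤ p.2 := hc.1 p hmem
        have hpr : p.1 ≤ r.1 := hle p hmem
        have hpw := hc.2
        rw [hinit, List.pairwise_append] at hpw
        have hinitlt : ∀ q ∈ init, q.2 < p.1 := fun q hq => hpw.2.2 q hq p (by simp)
        have hinitchain : pvChain init := by
          refine ⟨fun q hq => hc.1 q (by rw [hinit]; exact List.mem_append_left _ hq), hpw.1⟩
        by_cases hovl : r.1 ≤ p.2
        · by_cases hext : r.2 > p.2
          · have hms : pvMergeStep acc r = init ++ [(p.1, r.2)] := by
              have hdrop : acc.dropLast = init := by rw [hinit]; simp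
              simp [pvMergeStep, hrv, hlast, hovl, hext, hdrop]
            rw [hms]
            refine ⟨⟨?_, ?_⟩, fun x => ?_, ?_⟩
            · intro q hq
              rcases List.mem_append.1 hq with hq | hq
              · exact hinitchain.1 q hq
              · simp at hq; subst hq; simp; omega
            · rw [List.pairwise_append]
              refine ⟨hinitchain.2, by simp, ?_⟩
              intro q hq q' hq'; simp at hq'; subst hq'
              simpa using hinitlt q hq
            · rw [hinit]
              simp only [pvCovered, List.mem_append, List.mem_singleton]
              constructor
              · rintro ⟨q, hq, hx⟩
                rcases hq with hq | rfl
                · exact Or.inl ⟨q, Or.inl hq, hx⟩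
                · simp only at hx
                  by_cases hxp : x ≤ p.2
                  · exact Or.inl ⟨p, Or.inr rfl, by omega⟩
                  · exact Or.inr (by omega)
              · rintro (⟨q, hq, hx⟩ | hx)
                · rcases hq with hq | hq
                  · exact ⟨q, Or.inl hq, hx⟩
                  · subst hq
                    exact ⟨(q.1, r.2), Or.inr rfl, by simp only; omega⟩
                · exact ⟨(p.1, r.2), Or.inr rfl, by simp only; omega⟩
            · intro q hq
              rcases List.mem_append.1 hq with hq | hq
              · exact Or.inl (List.mem_map.2 ⟨q, by rw [hinit]; exact List.mem_append_left _ hq, rfl⟩)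
              · simp at hq
                exact Or.inl (List.mem_map.2 ⟨p, hmem, by rw [hq]⟩)
          · have hms : pvMergeStep acc r = acc := by simp [pvMergeStep, hrv, hlast, hovl, hext]
            rw [hms]
            refine ⟨hc, fun x => ⟨Or.inl, ?_⟩, fun q hq => Or.inl (List.mem_map.2 ⟨q, hq, rfl⟩)⟩
            rintro (h | hx); · exact h
            · exact ⟨p, hmem, by omega⟩
        · have hms : pvMergeStep acc r = acc ++ [r] := by simp [pvMergeStep, hrv, hlast, hovl]
          rw [hms]
          refine ⟨⟨?_, ?_⟩, fun x => ?_, ?_⟩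
          · intro q hq
            rcases List.mem_append.1 hq with hq | hq
            · exact hc.1 q hq
            · simp at hq; subst hq; omega
          · rw [List.pairwise_append]
            refine ⟨hc.2, by simp, ?_⟩
            intro q hq q' hq'; simp at hq'; subst hq'
            rw [hinit] at hq
            rcases List.mem_append.1 hq with hq | hq
            · have := hinitlt q hq; omega
            · simp at hq; subst hq; omega
          · simp only [pvCovered, List.mem_append, List.mem_singleton]
            constructor
            · rintro ⟨q, hq | rfl, hx⟩
              · exact Or.inl ⟨q, hq, hx⟩
              · exact Or.inr hx
            · rintro (⟨q, hq, hx⟩ | hx)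
              · exact ⟨q, Or.inl hq, hx⟩
              · exact ⟨r, Or.inr rfl, hx⟩
          · intro q hq
            rcases List.mem_append.1 hq with hq | hq
            · exact Or.inl (List.mem_map.2 ⟨q, hq, rfl⟩)
            · simp at hq; subst hq; exact Or.inr rfl

theorem pvMergeFold_spec (rs : List (Int × Int)) :
    ∀ acc : List (Int × Int), pvChain acc →
    (∀ r' ∈ rs, ∀ q ∈ acc, q.1 ≤ r'.1) →
    rs.Pairwise (fun a b => a.1 ≤ b.1) →
    pvChain (rs.foldl pvMergeStep acc) ∧
    (∀ x, pvCovered (rs.foldl pvMergeStep acc) x ↔ (pvCovered acc x ∨ pvCovered rs x)) := by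
  induction rs with
  | nil => intro acc hc _ _; exact ⟨hc, fun x => by simp [pvCovered]⟩
  | cons r rest ih =>
      intro acc hc hle hsorted
      have hstep := pvMergeStep_spec acc r hc (hle r (by simp))
      have hsorted' := (List.pairwise_cons.1 hsorted)
      have hle' : ∀ r' ∈ rest, ∀ q ∈ pvMergeStep acc r, q.1 ≤ r'.1 := by
        intro r' hr' q hq
        rcases hstep.2.2 q hq with h1 | h1
        · obtain ⟨q', hq', hq1⟩ := List.mem_map.1 h1
          calc q.1 = q'.1 := hq1.symm
            _ ≤ r.1 := hle r (by simp) q' hq'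
            _ ≤ r'.1 := hsorted'.1 r' hr'
        · rw [h1]; exact hsorted'.1 r' hr'
      have := ih (pvMergeStep acc r) hstep.1 hle' hsorted'.2
      refine ⟨this.1, fun x => ?_⟩
      rw [List.foldl_cons] at *
      rw [this.2 x, hstep.2.1 x]
      simp only [pvCovered, List.mem_cons]
      constructor
      · rintro ((h | h) | ⟨q, hq, hx⟩)
        · exact Or.inl h
        · exact Or.inr ⟨r, Or.inl rfl, h⟩
        · exact Or.inr ⟨q, Or.inr hq, hx⟩
      · rintro (h | ⟨q, rfl | hq, hx⟩)
        · exact Or.inl (Or.inl h)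
        · exact Or.inl (Or.inr hx)
        · exact Or.inr ⟨q, hq, hx⟩

-- starts of a chain are monotone in the index (getD form)
theorem pvChain_start_mono (l : List (Int × Int)) (hc : pvChain l) :
    ∀ i j : Nat, i ≤ j → j < l.length → (l.getD i (0, 0)).1 ≤ (l.getD j (0, 0)).1 := by
  intro i j hij hj
  rcases eq_or_lt_of_le hij with rfl | hlt
  · exact le_refl _
  · have hi : i < l.length := lt_trans hlt hj
    rw [List.getD_eq_getElem l _ hi, List.getD_eq_getElem l _ hj]
    have := (List.pairwise_iff_getElem).1 hc.2 i j hi hj hlt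
    have h1 : l[i].1 ≤ l[i].2 := hc.1 _ (List.getElem_mem hi)
    omega

theorem pvBsearch_spec (l : List (Int × Int)) (x : Int)
    (hmono : ∀ i j : Nat, i ≤ j → j < l.length → (l.getD i (0, 0)).1 ≤ (l.getD j (0, 0)).1) :
    ∀ lo hi : Nat, lo ≤ hi → hi ≤ l.length →
    (∀ j, j < lo → (l.getD j (0, 0)).1 ≤ x) →
    (∀ j, hi ≤ j → j < l.length → ¬ (l.getD j (0, 0)).1 ≤ x) →
    (pvBsearch l x lo hi ≤ l.length ∧
     (∀ j, j < pvBsearch l x lo hi → (l.getD j (0, 0)).1 ≤ x) ∧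
     (∀ j, pvBsearch l x lo hi ≤ j → j < l.length → ¬ (l.getD j (0, 0)).1 ≤ x)) := by
  intro lo hi
  induction lo, hi using pvBsearch.induct l x with
  | case1 lo hi h mid hcmp ih =>
      intro _ hhi hlow hhigh
      rw [pvBsearch, dif_pos h, if_pos hcmp]
      refine ih (by omega) hhi ?_ hhigh
      intro j hj
      exact le_trans (hmono j mid (by omega) (by omega)) hcmp
  | case2 lo hi h mid hcmp ih =>
      intro hlohi hhi hlow hhigh
      rw [pvBsearch, dif_pos h, if_neg hcmp]
      refine ih (by omega) (by omega) hlow ?_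
      intro j hj hjlen hle
      exact hcmp (le_trans (hmono mid j hj (by omega)) hle)
  | case3 lo hi h =>
      intro hlohi hhi hlow hhigh
      rw [pvBsearch, dif_neg h]
      have : lo = hi := by omega
      subst this
      exact ⟨hhi, hlow, hhigh⟩

-- B's per-id test decides coverage of a chain
theorem pvQuery_iff (l : List (Int × Int)) (hc : pvChain l) (x : Int) :
    (let lo := pvBsearch l x 0 l.length
     if 0 < lo then (x ≤ (l.getD (lo - 1) (0, 0)).2) else False) ↔ pvCovered l x := by
  have hmono := pvChain_start_mono l hc
  have hbs := pvBsearch_spec l x hmono 0 l.length (Nat.zero_le _) (le_refl _)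
      (by intro j hj; omega) (by intro j hj hjl; omega)
  set k := pvBsearch l x 0 l.length with hk
  obtain ⟨hklen, hkall, hknone⟩ := hbs
  by_cases hk0 : 0 < k
  · simp only [hk0, if_true]
    have hk1 : k - 1 < l.length := by omega
    constructor
    · intro hx
      exact ⟨l.getD (k - 1) (0, 0), by rw [List.getD_eq_getElem l _ hk1]; exact List.getElem_mem hk1,
             hkall (k - 1) (by omega), hx⟩
    · rintro ⟨q, hq, hq1, hq2⟩
      obtain ⟨j, hj, hjq⟩ := List.mem_iff_getElem.1 hq
      have hjD : l.getD j (0, 0) = q := by rw [List.getD_eq_getElem l _ hj, hjq]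
      have hjk : j < k := by
        by_contra hjk
        exact hknone j (by omega) hj (by rw [hjD]; exact hq1)
      rcases eq_or_lt_of_le (by omega : j ≤ k - 1) with rfl | hlt
      · rw [hjD]; exact hq2
      · -- j < k-1: chain gives q.2 < start of k-1 ≤ x, contradiction
        exfalso
        have hpw := (List.pairwise_iff_getElem).1 hc.2 j (k - 1) hj hk1 hlt
        have hstart : (l.getD (k - 1) (0, 0)).1 ≤ x := hkall (k - 1) (by omega)
        rw [List.getD_eq_getElem l _ hk1] at hstart
        rw [hjq] at hpw
        omega
  · simp only [hk0, if_false, false_iff]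
    rintro ⟨q, hq, hq1, hq2⟩
    obtain ⟨j, hj, hjq⟩ := List.mem_iff_getElem.1 hq
    exact hknone j (by omega) hj (by rw [List.getD_eq_getElem l _ hj, hjq]; exact hq1)

-- ===== VERDICT (by name: the statement is the Claim_ definition above) =====
theorem get_fresh_available_ids_spec : Claim_equal_get_fresh_available_ids := by
  intro ranges ids _
  unfold Spec_get_fresh_available_ids get_fresh_available_ids get_fresh_available_ids_alt
  have hsortedpw : (PySem.List.sorted ranges (fun r => r.1)).Pairwise (fun a b => a.1 ≤ b.1) :=
    PySem.List.sorted_pairwise ranges _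
  have hperm : (PySem.List.sorted ranges (fun r => r.1)).Perm ranges :=
    PySem.List.sorted_perm ranges _ _
  have hfold := pvMergeFold_spec (PySem.List.sorted ranges (fun r => r.1)) []
    ⟨by simp, by simp⟩ (by simp) hsortedpw
  set merged := (PySem.List.sorted ranges (fun r => r.1)).foldl pvMergeStep [] with hmerged
  have hcov : ∀ x, pvCovered merged x ↔ pvCovered ranges x := by
    intro x
    rw [hfold.2 x]
    simp only [pvCovered, List.not_mem_nil]
    constructor
    · rintro (⟨q, h, _⟩ | ⟨q, hq, hx⟩); · cases h
      · exact ⟨q, hperm.mem_iff.1 hq, hx⟩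
    · rintro ⟨q, hq, hx⟩
      exact Or.inr ⟨q, hperm.mem_iff.2 hq, hx⟩
  have hsteps : (fun (acc : List Int) (x : Int) => pvInnerA ranges x acc) =
      (fun (out : List Int) (x : Int) =>
        let lo := pvBsearch merged x 0 merged.length
        if 0 < lo then
          (if x ≤ (merged.getD (lo - 1) (0, 0)).2 then out ++ [x] else out)
        else out) := by
    funext a z
    have hq := pvQuery_iff merged hfold.1 z
    simp only at hq ⊢
    by_cases h0 : 0 < pvBsearch merged z 0 merged.length
    · simp only [h0, if_true] at hq ⊢
      by_cases h2 : z ≤ (merged.getD (pvBsearch merged z 0 merged.length - 1) (0, 0)).2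
      · rw [if_pos h2, pvInnerA_pos _ _ _ ((hcov z).1 (hq.1 h2))]
      · rw [if_neg h2, pvInnerA_neg]
        intro hcv
        exact h2 (hq.2 ((hcov z).2 hcv))
    · simp only [h0, if_false, false_iff] at hq ⊢
      rw [pvInnerA_neg]
      intro hcv
      exact hq ((hcov z).2 hcv)
  rw [hsteps]
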